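-- pv_equiv track=rewrite | github.com/xinfuwcx/DeepCAD | src/core/meshing/mesh_optimizer.py | _build_node_connections
-- ===== SOURCE A (Python) =====
-- from typing import Dict, List, Optional, Union, Tuple, Any
--
-- def _build_node_connections(mesh: Dict[str, Any]) -> Dict[int, List[int]]:
--     """
--     构建节点连接关系
--
--     Args:
--         mesh: 网格数据
--
--     Returns:
--         节点连接字典，键为节点ID，值为与该节点相连的节点ID列表
--     """
--     node_connections = {}
--
--     # 遍历所有单元
--     for element in mesh.get('elements', []):
--         connectivity = element.get('connectivity', [])
--
--         # 对单元中的每个节点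
--         for i, node_id in enumerate(connectivity):
--             if node_id not in node_connections:
--                 node_connections[node_id] = []
--
--             # 将单元中的其他节点添加为连接节点
--             for j, other_node_id in enumerate(connectivity):
--                 if i != j and other_node_id not in node_connections[node_id]:
--                     node_connections[node_id].append(other_node_id)
--
--     return node_connections
-- ===== SOURCE B (Python) =====
-- def _build_node_connections(mesh):
--     # Pass 1: accumulate raw neighbor streams (no dedup check) using slices.
--     raw = {}
--     for element in mesh.get('elements', []):
--         conn = element.get('connectivity', [])
--         for i, node_id in enumerate(conn):
--             raw.setdefault(node_id, []).extend(conn[:i] + conn[i + 1:])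
--     # Pass 2: dedup each stream keeping first occurrences.
--     return {k: list(dict.fromkeys(v)) for k, v in raw.items()}
-- ===== Notes on version B (the rewrite author's own statement) =====
-- stated objective: alternative
-- what changed: B splits A's dedup-on-insert triple loop into two passes: a slice-based accumulation of raw neighbor streams (no membership scan per append) followed by one dict.fromkeys dedup pass per node.
import Mathlib
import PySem

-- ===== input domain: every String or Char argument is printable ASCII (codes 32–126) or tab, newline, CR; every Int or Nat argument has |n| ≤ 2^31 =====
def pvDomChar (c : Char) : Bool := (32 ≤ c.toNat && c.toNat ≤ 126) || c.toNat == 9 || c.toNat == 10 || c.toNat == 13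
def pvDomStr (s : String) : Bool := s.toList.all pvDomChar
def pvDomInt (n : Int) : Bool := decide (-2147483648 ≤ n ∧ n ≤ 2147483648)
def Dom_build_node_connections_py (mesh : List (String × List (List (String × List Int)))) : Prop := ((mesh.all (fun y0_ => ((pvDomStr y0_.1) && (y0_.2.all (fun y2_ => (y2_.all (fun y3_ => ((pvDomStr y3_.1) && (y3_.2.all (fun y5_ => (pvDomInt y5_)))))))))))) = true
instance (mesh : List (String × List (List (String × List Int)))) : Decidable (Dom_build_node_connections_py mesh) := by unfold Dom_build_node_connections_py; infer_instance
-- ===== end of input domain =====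

-- B replaces A's dedup-on-insert triple loop by slice-based raw accumulation plus a final
-- dict.fromkeys dedup pass (objective: alternative decomposition, same results).

-- ===== PORT A =====
def build_node_connections_py (mesh : List (String × List (List (String × List Int)))) : List (Int × List Int) :=
  ((PySem.Dict.getD (PySem.Dict.mk mesh) "elements" []).foldl (fun nc element =>
    let connectivity := PySem.Dict.getD (PySem.Dict.mk element) "connectivity" []
    (PySem.List.enumerate connectivity).foldl (fun nc p =>
      let nc := if ¬ PySem.Dict.contains nc p.2 then PySem.Dict.insert nc p.2 [] else nc
      (PySem.List.enumerate connectivity).foldl (fun nc q =>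
        if p.1 ≠ q.1 ∧ q.2 ∉ PySem.Dict.getD nc p.2 [] then
          PySem.Dict.modify nc p.2 [] (· ++ [q.2])
        else nc) nc) nc)
    PySem.Dict.empty).items

-- ===== PORT B =====
def build_node_connections_py_alt (mesh : List (String × List (List (String × List Int)))) : List (Int × List Int) :=
  -- pass 1: raw neighbor streams via slices (conn[:i] + conn[i+1:]), setdefault + extend, no dedup
  let raw := (PySem.Dict.getD (PySem.Dict.mk mesh) "elements" []).foldl (fun nc element =>
    let conn := PySem.Dict.getD (PySem.Dict.mk element) "connectivity" []
    (PySem.List.enumerate conn).foldl (fun nc p =>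
      PySem.Dict.modify (PySem.Dict.setdefault nc p.2 []) p.2 []
        (· ++ (PySem.List.slice conn none (some p.1) ++ PySem.List.slice conn (some (p.1 + 1)) none))) nc)
    PySem.Dict.empty
  -- pass 2: dict.fromkeys dedup per node, keys kept in place
  raw.items.map (fun kv => (kv.1, PySem.List.dedup kv.2))

-- ===== PRECONDITION & SPEC =====
def Spec_build_node_connections_py (mesh : List (String × List (List (String × List Int)))) (out : List (Int × List Int)) : Prop := out = build_node_connections_py_alt mesh
instance (mesh : List (String × List (List (String × List Int)))) (out : List (Int × List Int)) : Decidable (Spec_build_node_connections_py mesh out) := by unfold Spec_build_node_connections_py; infer_instance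

-- ===== CLAIM (what is proved, stated in full; the proofs are below) =====
def Claim_equal_build_node_connections_py : Prop := ∀ (mesh : List (String × List (List (String × List Int)))), Dom_build_node_connections_py mesh → Spec_build_node_connections_py mesh (build_node_connections_py mesh)

-- ===== LEMMAS AND PROOFS =====

-- dedup view of one dict entry (A's entry is B's raw entry deduped)
def pvMd (kv : Int × List Int) : Int × List Int := (kv.1, PySem.List.dedup kv.2)

-- the invariant: A's dict is B's raw dict with every value deduped; B's keys stay unique
def pvInv (a b : PySem.Dict Int (List Int)) : Prop :=
  a.items = b.items.map pvMd ∧ b.keys.Nodup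

theorem pvInv_contains (a b : PySem.Dict Int (List Int)) (h : a.items = b.items.map pvMd) (k : Int) :
    PySem.Dict.contains a k = PySem.Dict.contains b k := by
  simp only [PySem.Dict.contains, h, List.any_map]
  rfl

theorem pvInv_keys (a b : PySem.Dict Int (List Int)) (h : a.items = b.items.map pvMd) :
    PySem.Dict.keys a = PySem.Dict.keys b := by
  simp only [PySem.Dict.keys, h, List.map_map]
  rfl

theorem pvInv_getD (a b : PySem.Dict Int (List Int)) (h : a.items = b.items.map pvMd) (k : Int) :
    PySem.Dict.getD a k [] = PySem.List.dedup (PySem.Dict.getD b k []) := by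
  simp only [PySem.Dict.getD, PySem.Dict.get?, h, List.find?_map]
  have hpred : ((fun p : Int × List Int => p.1 == k) ∘ pvMd) = (fun p => p.1 == k) := rfl
  rw [hpred]
  cases b.items.find? (fun p => p.1 == k) with
  | none => rfl
  | some p => rfl

theorem pvInv_modify (a b : PySem.Dict Int (List Int)) (h : a.items = b.items.map pvMd)
    (k : Int) (f g : List Int → List Int)
    (hf : ∀ v, f (PySem.List.dedup v) = PySem.List.dedup (g v)) :
    (PySem.Dict.modify a k [] f).items = (PySem.Dict.modify b k [] g).items.map pvMd := by
  have hc := pvInv_contains a b h k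
  have hg := pvInv_getD a b h k
  by_cases hbk : PySem.Dict.contains b k = true
  · simp only [PySem.Dict.modify]
    rw [PySem.Dict.items_insert_of_contains a _ (hc.trans hbk),
        PySem.Dict.items_insert_of_contains b _ hbk, h, List.map_map, List.map_map]
    refine List.map_congr_left (fun p _ => ?_)
    by_cases hpk : p.1 = k
    · simp [Function.comp, pvMd, hpk, hg]
      simpa [PySem.List.dedup_eq_ofList] using hf (PySem.Dict.getD b k [])
    · simp [Function.comp, pvMd, hpk]
  · have hbk' : PySem.Dict.contains b k = false := by simpa using hbk
    simp only [PySem.Dict.modify]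
    rw [PySem.Dict.items_insert_of_not_contains a _ (by rw [hc]; exact hbk'),
        PySem.Dict.items_insert_of_not_contains b _ hbk', List.map_append, h]
    simp [pvMd, hg]
    simpa [PySem.List.dedup_eq_ofList] using hf (PySem.Dict.getD b k [])

-- re-inserting the current value is a no-op on a dict with unique keys
theorem pv_insert_getD_self (d : PySem.Dict Int (List Int)) (k : Int) (dflt : List Int)
    (hc : PySem.Dict.contains d k = true) (hn : d.keys.Nodup) :
    PySem.Dict.insert d k (PySem.Dict.getD d k dflt) = d := by
  refine PySem.Dict.ext ?_
  rw [PySem.Dict.items_insert_of_contains d _ hc]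
  have hp : ∀ p ∈ d.items,
      (if (p.1 == k) = true then (k, PySem.Dict.getD d k dflt) else p) = p := by
    intro p hp
    by_cases hpk : p.1 = k
    · have hmem : (k, p.2) ∈ d.items := by rw [← hpk]; exact hp
      have hv := PySem.Dict.getD_of_mem_items (d := d) hmem hn dflt
      rw [if_pos (by simp [hpk]), hv, ← hpk]
    · rw [if_neg (by simp [hpk])]
  rw [List.map_congr_left hp]
  simp

theorem pv_modify_congr (d : PySem.Dict Int (List Int)) (k : Int) (f g : List Int → List Int)
    (h : f (PySem.Dict.getD d k []) = g (PySem.Dict.getD d k [])) :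
    PySem.Dict.modify d k [] f = PySem.Dict.modify d k [] g := by
  simp only [PySem.Dict.modify, h]

theorem pv_modify_modify (d : PySem.Dict Int (List Int)) (k : Int) (f g : List Int → List Int) :
    PySem.Dict.modify (PySem.Dict.modify d k [] f) k [] g
      = PySem.Dict.modify d k [] (fun v => g (f v)) := by
  conv_lhs => rw [PySem.Dict.modify]
  rw [PySem.Dict.getD_modify_self]
  simp only [PySem.Dict.modify]
  rw [PySem.Dict.insert_insert_self]

-- A's inner j-loop is a single modify with a value-level fold
theorem pv_inner_loop (L : List (Int × Int)) (i k : Int) :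
    ∀ (a : PySem.Dict Int (List Int)),
      PySem.Dict.contains a k = true → a.keys.Nodup →
    L.foldl (fun nc q =>
        if i ≠ q.1 ∧ q.2 ∉ PySem.Dict.getD nc k [] then PySem.Dict.modify nc k [] (· ++ [q.2]) else nc) a
      = PySem.Dict.modify a k []
          (fun v => L.foldl (fun v q => if i ≠ q.1 ∧ q.2 ∉ v then v ++ [q.2] else v) v) := by
  induction L with
  | nil =>
      intro a hc hn
      simp only [List.foldl_nil]
      exact (pv_insert_getD_self a k [] hc hn).symm
  | cons q L ih =>
      intro a hc hn
      simp only [List.foldl_cons]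
      by_cases hcond : i ≠ q.1 ∧ q.2 ∉ PySem.Dict.getD a k []
      · rw [if_pos hcond]
        have hc' : (PySem.Dict.modify a k [] (· ++ [q.2])).contains k = true := by
          rw [PySem.Dict.contains_modify]; simp
        have hn' : (PySem.Dict.modify a k [] (· ++ [q.2])).keys.Nodup := by
          rw [PySem.Dict.keys_modify]
          exact PySem.Dict.nodup_keys_insert _ _ _ hn
        rw [ih _ hc' hn', pv_modify_modify]
        refine pv_modify_congr a k _ _ ?_
        rw [if_pos hcond]
      · rw [if_neg hcond, ih _ hc hn]
        refine pv_modify_congr a k _ _ ?_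
        rw [if_neg hcond]

-- the dedup-on-insert value fold is a set update
theorem pv_value_fold (L : List (Int × Int)) (i : Int) (v : List Int) :
    L.foldl (fun v q => if i ≠ q.1 ∧ q.2 ∉ v then v ++ [q.2] else v) v
      = PySem.Set.update v ((L.filter (fun q => decide (i ≠ q.1))).map (·.2)) := by
  have hstep : (fun (v : List Int) (q : Int × Int) => if i ≠ q.1 ∧ q.2 ∉ v then v ++ [q.2] else v)
      = fun v q => if i ≠ q.1 then PySem.Set.add v q.2 else v := by
    funext v q
    by_cases h1 : i ≠ q.1
    · rw [if_pos h1, PySem.Set.add_eq_ite]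
      by_cases h2 : q.2 ∈ v
      · rw [if_neg (fun hh => hh.2 h2), if_pos h2]
      · rw [if_pos ⟨h1, h2⟩, if_neg h2]
    · rw [if_neg (fun hh => h1 hh.1), if_neg h1]
  rw [hstep, PySem.List.foldl_ite_eq_foldl_filter (p := fun q : Int × Int => i ≠ q.1),
      PySem.Set.update_map_eq_foldl_add]

-- the filtered value stream of an enumerate loop equals the two slices
theorem pv_filter_slices (conn : List Int) : ∀ (s i : Int), s ≤ i →
    ((PySem.List.enumerate conn s).filter (fun q => decide (i ≠ q.1))).map (·.2)
      = conn.take (i - s).toNat ++ conn.drop ((i - s).toNat + 1) := by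
  induction conn with
  | nil => intro s i _; simp [PySem.List.enumerate]
  | cons c cs ih =>
      intro s i hsi
      rw [PySem.List.enumerate_cons, List.filter_cons]
      by_cases hik : i = s
      · have hd : (decide (i ≠ s)) = false := by simp [hik]
        rw [hd]
        have hall : (PySem.List.enumerate cs (s+1)).filter (fun q => decide (i ≠ q.1))
            = PySem.List.enumerate cs (s+1) := by
          refine List.filter_eq_self.mpr (fun p hp => ?_)
          rcases (PySem.List.mem_enumerate_iff cs (s+1) p).mp hp with ⟨kk, hkk, rfl⟩
          simp only [decide_eq_true_eq]
          omega
        rw [if_neg (by simp)]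
        rw [hall, PySem.List.map_snd_enumerate]
        have h0 : (i - s).toNat = 0 := by omega
        rw [h0]
        simp
      · have hd : (decide (i ≠ s)) = true := by simp [hik]
        rw [hd, if_pos rfl, List.map_cons, ih (s+1) i (by omega)]
        have ht : (i - s).toNat = (i - (s+1)).toNat + 1 := by omega
        rw [ht]
        simp [List.take_succ_cons, List.drop_succ_cons]

-- one (i, node) step of the outer loops preserves the invariant
theorem pv_step (conn : List Int) (p : Int × Int) (hi : 0 ≤ p.1)
    (a b : PySem.Dict Int (List Int)) (hab : pvInv a b) :
    pvInv
      ((PySem.List.enumerate conn).foldl (fun nc q =>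
          if p.1 ≠ q.1 ∧ q.2 ∉ PySem.Dict.getD nc p.2 [] then
            PySem.Dict.modify nc p.2 [] (· ++ [q.2]) else nc)
        (if ¬ PySem.Dict.contains a p.2 then PySem.Dict.insert a p.2 [] else a))
      (PySem.Dict.modify (PySem.Dict.setdefault b p.2 []) p.2 []
        (· ++ (PySem.List.slice conn none (some p.1) ++ PySem.List.slice conn (some (p.1 + 1)) none))) := by
  obtain ⟨h, hn⟩ := hab
  have hck : PySem.Dict.contains a p.2 = PySem.Dict.contains b p.2 := pvInv_contains a b h p.2
  -- relate the ensured dicts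
  have hstage : (if ¬ PySem.Dict.contains a p.2 then PySem.Dict.insert a p.2 [] else a).items
        = (PySem.Dict.setdefault b p.2 []).items.map pvMd
      ∧ (PySem.Dict.setdefault b p.2 []).keys.Nodup
      ∧ (PySem.Dict.setdefault b p.2 []).contains p.2 = true := by
    by_cases hc : PySem.Dict.contains b p.2 = true
    · rw [PySem.Dict.setdefault_of_contains b _ hc]
      rw [if_neg (by rw [hck, hc]; simp)]
      exact ⟨h, hn, hc⟩
    · have hc' : PySem.Dict.contains b p.2 = false := by simpa using hc
      rw [PySem.Dict.setdefault_of_not_contains b _ hc']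
      rw [if_pos (by rw [hck, hc']; simp)]
      refine ⟨?_, PySem.Dict.nodup_keys_insert _ _ _ hn, PySem.Dict.contains_insert_self _ _ _⟩
      rw [PySem.Dict.items_insert_of_not_contains a _ (by rw [hck]; exact hc'),
          PySem.Dict.items_insert_of_not_contains b _ hc', List.map_append, h]
      rfl
  obtain ⟨h1, hn1, hc1⟩ := hstage
  have ha1c : (if ¬ PySem.Dict.contains a p.2 then PySem.Dict.insert a p.2 [] else a).contains p.2 = true := by
    rw [pvInv_contains _ _ h1]; exact hc1
  have ha1n : (if ¬ PySem.Dict.contains a p.2 then PySem.Dict.insert a p.2 [] else a).keys.Nodup := by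
    rw [pvInv_keys _ _ h1]; exact hn1
  rw [pv_inner_loop _ _ _ _ ha1c ha1n]
  -- the slice stream
  have hsl : PySem.List.slice conn none (some p.1) ++ PySem.List.slice conn (some (p.1 + 1)) none
      = conn.take p.1.toNat ++ conn.drop (p.1.toNat + 1) := by
    rw [PySem.List.slice_to conn hi, PySem.List.slice_from conn (by omega : (0:Int) ≤ p.1 + 1)]
    have : (p.1 + 1).toNat = p.1.toNat + 1 := by omega
    rw [this]
  have hvf : (fun v => (PySem.List.enumerate conn).foldl
        (fun v q => if p.1 ≠ q.1 ∧ q.2 ∉ v then v ++ [q.2] else v) v)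
      = (fun v => PySem.Set.update v (conn.take p.1.toNat ++ conn.drop (p.1.toNat + 1))) := by
    funext v
    rw [pv_value_fold, pv_filter_slices conn 0 p.1 hi]
    have : p.1 - 0 = p.1 := by omega
    rw [this]
  rw [hvf, hsl]
  constructor
  · refine pvInv_modify _ _ h1 p.2 _ _ (fun v => ?_)
    rw [PySem.List.dedup_eq_ofList, PySem.List.dedup_eq_ofList, PySem.Set.ofList_append]
  · rw [PySem.Dict.keys_modify]
    exact PySem.Dict.nodup_keys_insert _ _ _ hn1

theorem pv_foldl_rel {σ τ ι : Type} (R : σ → τ → Prop) (f : σ → ι → σ) (g : τ → ι → τ)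
    (L : List ι) (h : ∀ s t x, x ∈ L → R s t → R (f s x) (g t x)) :
    ∀ (s : σ) (t : τ), R s t → R (L.foldl f s) (L.foldl g t) := by
  induction L with
  | nil => intro s t hst; exact hst
  | cons x L ih =>
      intro s t hst
      exact ih (fun s t y hy => h s t y (List.mem_cons_of_mem _ hy)) _ _
        (h s t x (List.mem_cons_self) hst)

-- ===== VERDICT (by name: the statement is the Claim_ definition above) =====
theorem build_node_connections_py_spec : Claim_equal_build_node_connections_py := by
  intro mesh _
  show build_node_connections_py mesh = build_node_connections_py_alt mesh
  unfold build_node_connections_py build_node_connections_py_alt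
  have main : pvInv
      ((PySem.Dict.getD (PySem.Dict.mk mesh) "elements" []).foldl (fun nc element =>
        let connectivity := PySem.Dict.getD (PySem.Dict.mk element) "connectivity" []
        (PySem.List.enumerate connectivity).foldl (fun nc p =>
          let nc := if ¬ PySem.Dict.contains nc p.2 then PySem.Dict.insert nc p.2 [] else nc
          (PySem.List.enumerate connectivity).foldl (fun nc q =>
            if p.1 ≠ q.1 ∧ q.2 ∉ PySem.Dict.getD nc p.2 [] then
              PySem.Dict.modify nc p.2 [] (· ++ [q.2])
            else nc) nc) nc)
        PySem.Dict.empty)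
      ((PySem.Dict.getD (PySem.Dict.mk mesh) "elements" []).foldl (fun nc element =>
        let conn := PySem.Dict.getD (PySem.Dict.mk element) "connectivity" []
        (PySem.List.enumerate conn).foldl (fun nc p =>
          PySem.Dict.modify (PySem.Dict.setdefault nc p.2 []) p.2 []
            (· ++ (PySem.List.slice conn none (some p.1) ++ PySem.List.slice conn (some (p.1 + 1)) none))) nc)
        PySem.Dict.empty) := by
    refine pv_foldl_rel pvInv _ _ _ (fun s t element _ hst => ?_) _ _ ⟨rfl, List.nodup_nil⟩
    refine pv_foldl_rel pvInv _ _ _ (fun s t p hp hst' => ?_) _ _ hst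
    have hi : 0 ≤ p.1 := by
      rcases (PySem.List.mem_enumerate_iff _ 0 p).mp hp with ⟨kk, hkk, rfl⟩
      simp
    exact pv_step _ p hi s t hst'
  exact main.1
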